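-- pv_equiv track=rewrite | github.com/grigs28/WinPEManager | core/version_replacer.py | _parse_appx_packages
-- ===== SOURCE A (Python) =====
-- from typing import Dict, List, Tuple, Optional, Any
--
-- def _parse_appx_packages(stdout: str) -> List[Dict]:
--     """解析Appx包"""
--     appx_packages = []
--     lines = stdout.split('\n')
--
--     current_package = {}
--     for line in lines:
--         line = line.strip()
--
--         if line.startswith("DisplayName :"):
--             if current_package:
--                 appx_packages.append(current_package)
--             current_package = {"display_name": line.split(":", 1)[1].strip()}
--         elif " : " in line and current_package:
--             key, value = line.split(":", 1)
--             key = key.strip().lower().replace(" ", "_")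
--             value = value.strip()
--             current_package[key] = value
--
--     if current_package:
--         appx_packages.append(current_package)
--
--     return appx_packages
-- ===== SOURCE B (Python) =====
-- from typing import Dict, List
--
--
-- def _parse_appx_packages(stdout: str) -> List[Dict]:
--     """Two-phase: group stripped lines by 'DisplayName :' headers, then map each group to a dict."""
--     stripped = [ln.strip() for ln in stdout.split('\n')]
--     groups = []
--     for ln in stripped:
--         if ln.startswith("DisplayName :"):
--             groups.append([ln])
--         elif groups:
--             groups[-1].append(ln)
--     result = []
--     for g in groups:
--         pkg = {"display_name": g[0].split(":", 1)[1].strip()}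
--         for ln in g[1:]:
--             if " : " in ln:
--                 key, value = ln.split(":", 1)
--                 pkg[key.strip().lower().replace(" ", "_")] = value.strip()
--         result.append(pkg)
--     return result
-- ===== Notes on version B (the rewrite author's own statement) =====
-- stated objective: alternative
-- what changed: Replaced A's single interleaved loop with mutable current-package state by a two-phase pipeline: first partition the stripped lines into groups opened at each 'DisplayName :' header, then map each group independently to its field dict.
import Mathlib
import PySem

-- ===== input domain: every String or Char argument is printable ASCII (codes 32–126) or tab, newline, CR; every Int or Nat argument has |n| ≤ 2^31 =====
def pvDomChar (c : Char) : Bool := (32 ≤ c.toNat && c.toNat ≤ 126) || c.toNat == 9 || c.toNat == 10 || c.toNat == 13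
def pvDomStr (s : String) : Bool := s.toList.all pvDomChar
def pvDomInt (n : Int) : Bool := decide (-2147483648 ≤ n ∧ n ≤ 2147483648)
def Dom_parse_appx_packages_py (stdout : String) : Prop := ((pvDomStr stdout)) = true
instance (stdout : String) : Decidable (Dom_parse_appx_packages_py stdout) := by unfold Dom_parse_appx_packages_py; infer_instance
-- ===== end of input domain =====

-- B re-organizes A's single interleaved loop into a two-phase pipeline (group lines, then parse each
-- group); same cost, same return value — objective: alternative decomposition.

-- ===== PORT A =====
-- shared helper: line.split(":", 1) unpacked into (before, after); both callers guard that a ':' is present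
def pvColonSplit (l : String) : String × String :=
  match PySem.Str.splitMax? l ":" 1 with
  | some [a, b] => (a, b)
  | _ => (l, "")   -- unreachable under the callers' guards ("DisplayName :" prefix / " : " membership)

-- shared guard tests (used verbatim by both ports)
def pvIsHeader (l : String) : Bool := PySem.Str.startswith l "DisplayName :"
def pvHasColon (l : String) : Bool := PySem.Str.isIn " : " l

-- stdout.split('\n'); the separator is nonempty, so split? is never none
def pvSplitLines (s : String) : List String := (PySem.Str.split? s "\n").getD []

-- key.strip().lower().replace(" ", "_")
def pvNormKey (k : String) : String :=
  PySem.Str.replace (PySem.Str.lower (PySem.Str.strip k)) " " "_"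

-- one iteration of A's for-loop over (appx_packages, current_package)
def pvAStep (st : List (PySem.Dict String String) × PySem.Dict String String) (line : String) :
    List (PySem.Dict String String) × PySem.Dict String String :=
  let l := PySem.Str.strip line
  if pvIsHeader l then
    ((if st.2.items.isEmpty then st.1 else st.1 ++ [st.2]),
     PySem.Dict.empty.insert "display_name" (PySem.Str.strip (pvColonSplit l).2))
  else if pvHasColon l && !st.2.items.isEmpty then
    (st.1, st.2.insert (pvNormKey (pvColonSplit l).1) (PySem.Str.strip (pvColonSplit l).2))
  else st

def parse_appx_packages_py (stdout : String) : List (List (String × String)) :=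
  let lines := pvSplitLines stdout
  let st := lines.foldl pvAStep ([], PySem.Dict.empty)
  (if st.2.items.isEmpty then st.1 else st.1 ++ [st.2]).map PySem.Dict.items

-- ===== PORT B =====
-- phase 1, one line: open a new group at a header, else append to the last group (if any)
def pvBGroupStep (gs : List (List String)) (ln : String) : List (List String) :=
  if pvIsHeader ln then gs ++ [[ln]]
  else if !gs.isEmpty then gs.dropLast ++ [gs.getLast! ++ [ln]]
  else gs

-- phase 2: one group → its field dict
def pvParseGroup (g : List String) : PySem.Dict String String :=
  match g with
  | [] => PySem.Dict.empty   -- unreachable: every group starts with its header line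
  | h :: rest =>
    rest.foldl (fun d ln =>
        if pvHasColon ln then
          d.insert (pvNormKey (pvColonSplit ln).1) (PySem.Str.strip (pvColonSplit ln).2)
        else d)
      (PySem.Dict.empty.insert "display_name" (PySem.Str.strip (pvColonSplit h).2))

def parse_appx_packages_py_alt (stdout : String) : List (List (String × String)) :=
  let stripped := (pvSplitLines stdout).map PySem.Str.strip
  let groups := stripped.foldl pvBGroupStep []
  (groups.map pvParseGroup).map PySem.Dict.items

-- ===== PRECONDITION & SPEC =====
def Spec_parse_appx_packages_py (stdout : String) (out : List (List (String × String))) : Prop := out = parse_appx_packages_py_alt stdout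
instance (stdout : String) (out : List (List (String × String))) : Decidable (Spec_parse_appx_packages_py stdout out) := by unfold Spec_parse_appx_packages_py; infer_instance

-- ===== CLAIM (what is proved, stated in full; the proofs are below) =====
def Claim_equal_parse_appx_packages_py : Prop := ∀ (stdout : String), Dom_parse_appx_packages_py stdout → Spec_parse_appx_packages_py stdout (parse_appx_packages_py stdout)

-- ===== LEMMAS AND PROOFS =====

-- the loop invariant tying A's (appx_packages, current_package) to B's group list
def pvRel (gs : List (List String))
    (st : List (PySem.Dict String String) × PySem.Dict String String) : Prop :=
  (gs = [] ∧ st = ([], PySem.Dict.empty)) ∨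
  (∃ init last, gs = init ++ [last] ∧ last ≠ [] ∧
     st.1 = init.map pvParseGroup ∧ st.2 = pvParseGroup last ∧ st.2.items ≠ [])

lemma pvEmpty_items : (PySem.Dict.empty : PySem.Dict String String).items = [] := rfl

lemma pvInsert_items_ne_nil (d : PySem.Dict String String) (k v : String) :
    (d.insert k v).items ≠ [] := by
  rw [PySem.Dict.items_insert]
  split
  · next h =>
    intro hnil
    rw [List.map_eq_nil_iff] at hnil
    have hk := (PySem.Dict.contains_iff_mem_keys d k).mp h
    simp [PySem.Dict.keys, hnil] at hk
  · simp

lemma pvParseGroup_append (h : String) (rest : List String) (ln : String) :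
    pvParseGroup ((h :: rest) ++ [ln]) =
      (if pvHasColon ln then
        (pvParseGroup (h :: rest)).insert (pvNormKey (pvColonSplit ln).1)
          (PySem.Str.strip (pvColonSplit ln).2)
      else pvParseGroup (h :: rest)) := by
  simp [pvParseGroup, List.foldl_append]

lemma pvStep_rel (gs : List (List String))
    (st : List (PySem.Dict String String) × PySem.Dict String String)
    (hrel : pvRel gs st) (line : String) :
    pvRel (pvBGroupStep gs (PySem.Str.strip line)) (pvAStep st line) := by
  rcases hrel with ⟨hgs, hst⟩ | ⟨init, last, hgs, hlast, h1, h2, hne⟩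
  · subst hgs hst
    by_cases hh : pvIsHeader (PySem.Str.strip line) = true
    · refine Or.inr ⟨[], [PySem.Str.strip line], ?_, ?_, ?_, ?_, ?_⟩ <;>
        simp [pvBGroupStep, pvAStep, hh, pvParseGroup, pvInsert_items_ne_nil, pvEmpty_items]
    · exact Or.inl ⟨by simp [pvBGroupStep, hh], by simp [pvAStep, hh, pvEmpty_items]⟩
  · have hne' : (pvParseGroup last).items ≠ [] := h2 ▸ hne
    have hcur : st.2.items.isEmpty = false := by simpa using hne
    obtain ⟨h0, rest, rfl⟩ : ∃ h0 rest, last = h0 :: rest := by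
      cases last with
      | nil => exact absurd rfl hlast
      | cons a b => exact ⟨a, b, rfl⟩
    by_cases hh : pvIsHeader (PySem.Str.strip line) = true
    · refine Or.inr ⟨init ++ [h0 :: rest], [PySem.Str.strip line], ?_, ?_, ?_, ?_, ?_⟩
      · simp [pvBGroupStep, hh, hgs]
      · simp
      · simp [pvAStep, hh, h1, h2, hne']
      · simp [pvAStep, hh, pvParseGroup]
      · simp only [pvAStep, hh, if_true]
        exact pvInsert_items_ne_nil _ _ _
    · refine Or.inr ⟨init, (h0 :: rest) ++ [PySem.Str.strip line], ?_, ?_, ?_, ?_, ?_⟩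
      · simp [pvBGroupStep, hh, hgs]
      · simp
      · by_cases hc : pvHasColon (PySem.Str.strip line) = true <;>
          simp [pvAStep, hh, hc, hcur, h1]
      · rw [pvParseGroup_append]
        by_cases hc : pvHasColon (PySem.Str.strip line) = true <;>
          simp [pvAStep, hh, hc, h2, hne']
      · by_cases hc : pvHasColon (PySem.Str.strip line) = true
        · simp only [pvAStep, hh, Bool.false_eq_true, if_false, hc, hcur, Bool.not_false,
            Bool.and_self, if_true]
          exact pvInsert_items_ne_nil _ _ _
        · simpa [pvAStep, hh, hc] using hne

lemma pvFold_rel (lines : List String) (gs : List (List String))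
    (st : List (PySem.Dict String String) × PySem.Dict String String)
    (hrel : pvRel gs st) :
    pvRel ((lines.map PySem.Str.strip).foldl pvBGroupStep gs) (lines.foldl pvAStep st) := by
  induction lines generalizing gs st with
  | nil => simpa using hrel
  | cons l ls ih =>
    simp only [List.map_cons, List.foldl_cons]
    exact ih _ _ (pvStep_rel gs st hrel l)

-- ===== VERDICT (by name: the statement is the Claim_ definition above) =====
theorem parse_appx_packages_py_spec : Claim_equal_parse_appx_packages_py := by
  intro stdout _
  unfold Spec_parse_appx_packages_py parse_appx_packages_py parse_appx_packages_py_alt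
  have h := pvFold_rel (pvSplitLines stdout) [] ([], PySem.Dict.empty)
    (Or.inl ⟨rfl, rfl⟩)
  rcases h with ⟨hgs, hst⟩ | ⟨init, last, hgs, hlast, h1, h2, hne⟩
  · simp only [hgs, hst]
    simp [PySem.Dict.empty]
  · have : ((pvSplitLines stdout).foldl pvAStep ([], PySem.Dict.empty)).2.items.isEmpty = false := by
      simpa using hne
    have hne' : (pvParseGroup last).items ≠ [] := h2 ▸ hne
    simp only [hgs, h1, h2]
    simp [hne']
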